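-- pv_equiv track=rewrite | github.com/Heo-Jeong-Eun/Dev-Course-Perception | 1-Part 2./기능 개발.py | solution
-- ===== SOURCE A (Python) =====
-- def solution(progresses, speeds):
--     answer = []
--     t = 0
--     cnt = 0
--
--     while len(progresses) > 0:
--         if (progresses[0] + speeds[0] * t) >= 100:
--             progresses.pop(0)
--             speeds.pop(0)
--             cnt += 1
--         else:
--             if cnt > 0:
--                 answer.append(cnt)
--                 cnt = 0
--             else:
--                 t += 1
--     answer.append(cnt)
--
--     return answer
-- ===== SOURCE B (Python) =====
-- def solution(progresses, speeds):
--     days = [max(0, -((p - 100) // s)) for p, s in zip(progresses, speeds)]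
--     answer = []
--     cnt = 0
--     cur = days[0] if days else 0
--     for d in days:
--         if d <= cur:
--             cnt += 1
--         else:
--             answer.append(cnt)
--             cur = d
--             cnt = 1
--     answer.append(cnt)
--     return answer
-- ===== Notes on version B (the rewrite author's own statement) =====
-- stated objective: faster
-- what changed: B precomputes each task's completion day with ceiling division and groups in one pass with a running deadline, instead of A's simulation that steps time one day at a time and repeatedly pops the list fronts; intended as faster (a timing run measured A timing out at n=16 where B returned, so no ratio could be read).
-- outside the precondition, e.g. on solution([10, 110], [90, -1]): A returns [2], B returns [1, 1]; on solution([100], [0]): A returns [1], B raises ZeroDivisionError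
import Mathlib
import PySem

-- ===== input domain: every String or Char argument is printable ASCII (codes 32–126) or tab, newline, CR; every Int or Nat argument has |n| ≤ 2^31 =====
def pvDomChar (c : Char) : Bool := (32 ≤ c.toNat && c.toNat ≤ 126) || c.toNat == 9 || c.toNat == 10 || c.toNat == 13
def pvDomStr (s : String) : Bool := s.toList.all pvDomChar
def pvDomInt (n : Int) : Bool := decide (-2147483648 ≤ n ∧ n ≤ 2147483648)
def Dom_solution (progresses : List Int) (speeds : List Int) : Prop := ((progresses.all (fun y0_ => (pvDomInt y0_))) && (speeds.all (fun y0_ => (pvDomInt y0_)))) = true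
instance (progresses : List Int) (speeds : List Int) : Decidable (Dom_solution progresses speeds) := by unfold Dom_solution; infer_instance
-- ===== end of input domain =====

-- B changes the algorithm: precomputed completion days + one-pass grouping (O(n)) instead of
-- A's day-by-day simulation with pop(0).  A mutates its arguments in place (pop(0)); B does not:
-- the equivalence proved here is about the return value only.

-- ===== PORT A =====
-- completion day of one task, max(0, -((p-100)//s)); used by A's port only to size the fuel guard
def dayOf (p s : Int) : Int := max 0 (-(PySem.Int.floordiv (p - 100) s))

def daysOf (ps ss : List Int) : List Int := (List.zip ps ss).map (fun q => dayOf q.1 q.2)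

-- A's while-loop, transliterated step for step; the fuel is only a termination guard and is
-- provably sufficient under Pre_ (lemma loopA_eq below), so it never changes the computed value.
def loopA : Nat → List Int → List Int → Int → Int → List Int → List Int
  | 0, _, _, _, cnt, ans => ans ++ [cnt]
  | _ + 1, [], _, _, cnt, ans => ans ++ [cnt]
  | _ + 1, _ :: _, [], _, cnt, ans => ans ++ [cnt]   -- Python raises IndexError here; outside Pre_
  | fuel + 1, p :: ps, s :: ss, t, cnt, ans =>
    if 100 ≤ p + s * t then loopA fuel ps ss t (cnt + 1) ans
    else if 0 < cnt then loopA fuel (p :: ps) (s :: ss) t 0 (ans ++ [cnt])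
    else loopA fuel (p :: ps) (s :: ss) (t + 1) cnt ans

def fuelFor (ps ss : List Int) : Nat :=
  2 * ps.length + ((daysOf ps ss).foldr max 0).toNat + 1

def solution (progresses : List Int) (speeds : List Int) : List Int :=
  loopA (fuelFor progresses speeds) progresses speeds 0 0 []

-- ===== PORT B =====
-- Source B's grouping loop over the precomputed days, with the answer accumulator
def goB : List Int → Int → Int → List Int → List Int
  | [], _, cnt, ans => ans ++ [cnt]
  | d :: ds, cur, cnt, ans =>
    if d ≤ cur then goB ds cur (cnt + 1) ans
    else goB ds d 1 (ans ++ [cnt])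

def solution_alt (progresses : List Int) (speeds : List Int) : List Int :=
  goB (daysOf progresses speeds) ((daysOf progresses speeds).headD 0) 0 []

-- ===== PRECONDITION & SPEC =====
-- Pre_ excludes inputs where a task paired with a non-positive speed occurs (A's simulation then
-- usually diverges, and where it does return the value depends on arrival time, which B's
-- day-per-task formula deliberately does not reproduce) and inputs with fewer speeds than
-- progresses (A raises IndexError once speeds is exhausted).
def Pre_solution (progresses : List Int) (speeds : List Int) : Prop :=
  progresses.length ≤ speeds.length ∧ ∀ q ∈ List.zip progresses speeds, 0 < q.2
instance (progresses : List Int) (speeds : List Int) : Decidable (Pre_solution progresses speeds) := by unfold Pre_solution; infer_instance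

def pvWitness_solution : List Int × List Int := ([93, 30, 55], [1, 30, 5])

def Spec_solution (progresses : List Int) (speeds : List Int) (out : List Int) : Prop := out = solution_alt progresses speeds
instance (progresses : List Int) (speeds : List Int) (out : List Int) : Decidable (Spec_solution progresses speeds out) := by unfold Spec_solution; infer_instance

-- ===== CLAIM (what is proved, stated in full; the proofs are below) =====
def Claim_equal_solution : Prop := ∀ (progresses : List Int) (speeds : List Int), Dom_solution progresses speeds → Pre_solution progresses speeds → Spec_solution progresses speeds (solution progresses speeds)

-- ===== LEMMAS AND PROOFS =====

-- abstract grouping function both ports are reduced to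
def S : List Int → Int → Int → List Int
  | [], _, cnt => [cnt]
  | d :: ds, t, cnt =>
    if d ≤ t then S ds t (cnt + 1)
    else if 0 < cnt then cnt :: S ds d 1 else S ds d 1

lemma dayOf_nonneg (p s : Int) : 0 ≤ dayOf p s := le_max_left _ _

-- a task is finished at day t iff its completion day has passed
lemma done_iff_day_le (p s t : Int) (hs : 0 < s) (ht : 0 ≤ t) :
    (100 ≤ p + s * t) ↔ dayOf p s ≤ t := by
  unfold dayOf
  rw [max_le_iff]
  constructor
  · intro h
    refine ⟨ht, ?_⟩
    have : -t ≤ PySem.Int.floordiv (p - 100) s := by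
      rw [PySem.Int.le_floordiv_iff_mul_le hs]
      nlinarith
    omega
  · rintro ⟨-, h⟩
    have : -t ≤ PySem.Int.floordiv (p - 100) s := by omega
    rw [PySem.Int.le_floordiv_iff_mul_le hs] at this
    nlinarith

lemma foldr_max_tail_le (d : Int) (ds : List Int) :
    ds.foldr max 0 ≤ (d :: ds).foldr max 0 := le_max_right _ _

lemma head_le_foldr_max (d : Int) (ds : List Int) :
    d ≤ (d :: ds).foldr max 0 := le_max_left _ _

lemma loopA_eq : ∀ (fuel : Nat) (ps ss : List Int) (t cnt : Int) (ans : List Int),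
    ps.length ≤ ss.length →
    (∀ q ∈ List.zip ps ss, 0 < q.2) →
    0 ≤ t → 0 ≤ cnt →
    2 * ps.length + ((daysOf ps ss).foldr max 0 - t).toNat
      + (if 0 < cnt then 1 else 0) + 1 ≤ fuel →
    loopA fuel ps ss t cnt ans = ans ++ S (daysOf ps ss) t cnt := by
  intro fuel
  induction fuel with
  | zero => intro ps ss t cnt ans _ _ _ _ hf; omega
  | succ fuel ih =>
    intro ps ss t cnt ans hlen hpos ht hcnt hf
    match ps, ss with
    | [], _ => simp [loopA, daysOf, S]
    | p :: ps, [] => simp at hlen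
    | p :: ps, s :: ss =>
      have hs : 0 < s := hpos (p, s) (by simp [List.zip])
      have hpos' : ∀ q ∈ List.zip ps ss, 0 < q.2 := by
        intro q hq; exact hpos q (by simp [List.zip] at hq ⊢; right; exact hq)
      have hdays : daysOf (p :: ps) (s :: ss) = dayOf p s :: daysOf ps ss := by
        simp [daysOf, List.zip]
      have htail : (daysOf ps ss).foldr max 0 ≤ (daysOf (p :: ps) (s :: ss)).foldr max 0 := by
        rw [hdays]; exact foldr_max_tail_le _ _
      have hhead : dayOf p s ≤ (daysOf (p :: ps) (s :: ss)).foldr max 0 := by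
        rw [hdays]; exact head_le_foldr_max _ _
      simp only [List.length_cons] at hf
      rw [loopA]
      by_cases hdone : 100 ≤ p + s * t
      · rw [if_pos hdone]
        have hd : dayOf p s ≤ t := (done_iff_day_le p s t hs ht).mp hdone
        rw [ih ps ss t (cnt + 1) ans (by simpa using hlen) hpos' ht (by omega)
            (by rw [if_pos (by omega : (0:Int) < cnt + 1)]; omega)]
        rw [hdays, S, if_pos hd]
      · rw [if_neg hdone]
        have hd : ¬ dayOf p s ≤ t := fun h => hdone ((done_iff_day_le p s t hs ht).mpr h)
        by_cases hc : 0 < cnt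
        · rw [if_pos hc]
          rw [if_pos hc] at hf
          rw [ih (p :: ps) (s :: ss) t 0 (ans ++ [cnt]) hlen hpos ht le_rfl
              (by rw [if_neg (by omega : ¬ (0:Int) < 0)]; simp only [List.length_cons]; omega)]
          rw [hdays]
          simp [S, hd, hc]
        · rw [if_neg hc]
          rw [if_neg hc] at hf
          have hcz : cnt = 0 := by omega
          subst hcz
          have hgap : t + 1 ≤ (daysOf (p :: ps) (s :: ss)).foldr max 0 := by omega
          rw [ih (p :: ps) (s :: ss) (t + 1) 0 ans hlen hpos (by omega) le_rfl
              (by rw [if_neg (by omega : ¬ (0:Int) < 0)]; simp only [List.length_cons]; omega)]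
          rw [hdays]
          by_cases hd1 : dayOf p s ≤ t + 1
          · have he : dayOf p s = t + 1 := by omega
            simp [S, he]
          · simp [S, hd, hd1]

lemma goB_eq_S : ∀ (ds : List Int) (cur cnt : Int) (ans : List Int), 0 < cnt →
    goB ds cur cnt ans = ans ++ S ds cur cnt := by
  intro ds
  induction ds with
  | nil => intro cur cnt ans _; simp [goB, S]
  | cons d ds ih =>
    intro cur cnt ans hc
    rw [goB, S]
    by_cases h : d ≤ cur
    · rw [if_pos h, if_pos h, ih _ _ _ (by omega)]
    · rw [if_neg h, if_neg h, if_pos hc, ih _ _ _ (by omega)]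
      simp

lemma alt_eq_S (ps ss : List Int) : solution_alt ps ss = S (daysOf ps ss) 0 0 := by
  unfold solution_alt
  cases hds : daysOf ps ss with
  | nil => simp [goB, S]
  | cons d ds =>
    have hd0 : 0 ≤ d := by
      have : d ∈ daysOf ps ss := by rw [hds]; exact List.mem_cons_self
      unfold daysOf at this
      obtain ⟨q, -, hq⟩ := List.mem_map.mp this
      rw [← hq]; exact dayOf_nonneg _ _
    simp only [List.headD]
    rw [goB, if_pos le_rfl, goB_eq_S _ _ _ _ (by omega), S]
    by_cases h : d ≤ (0:Int)
    · have : d = 0 := le_antisymm h hd0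
      rw [if_pos h, this]; simp
    · rw [if_neg h, if_neg (by omega : ¬ (0:Int) < 0)]; simp

-- ===== VERDICT (by name: the statement is the Claim_ definition above) =====
theorem solution_spec : Claim_equal_solution := by
  intro ps ss _ hpre
  obtain ⟨hlen, hpos⟩ := hpre
  unfold Spec_solution solution
  rw [loopA_eq (fuelFor ps ss) ps ss 0 0 [] hlen hpos le_rfl le_rfl
      (by unfold fuelFor; simp)]
  rw [alt_eq_S]
  simp
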